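-- pv_equiv track=rewrite | github.com/cipherboy/hash_framework | hash_framework/boolean/boolean.py | hash_tobitl
-- ===== SOURCE A (Python) =====
-- def hash_tobitl(num):
--     r = []
--     for i in range(31, -1, -1):
--         if (int(num) & 2**(i)) == (2**i):
--             r.append('T')
--         else:
--             r.append('F')
--     return r
-- ===== SOURCE B (Python) =====
-- def hash_tobitl(num):
--     bits = format(int(num) & 0xFFFFFFFF, '032b')
--     return ['T' if c == '1' else 'F' for c in bits]
-- ===== Notes on version B (the rewrite author's own statement) =====
-- stated objective: idiomatic
-- what changed: Instead of testing each bit position with a power-of-two bitwise AND in a descending loop, B masks the number once to its low thirty-two bits, renders the fixed-width binary string with format(..., '032b'), and classifies each character as 'T'/'F'.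
import Mathlib
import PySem

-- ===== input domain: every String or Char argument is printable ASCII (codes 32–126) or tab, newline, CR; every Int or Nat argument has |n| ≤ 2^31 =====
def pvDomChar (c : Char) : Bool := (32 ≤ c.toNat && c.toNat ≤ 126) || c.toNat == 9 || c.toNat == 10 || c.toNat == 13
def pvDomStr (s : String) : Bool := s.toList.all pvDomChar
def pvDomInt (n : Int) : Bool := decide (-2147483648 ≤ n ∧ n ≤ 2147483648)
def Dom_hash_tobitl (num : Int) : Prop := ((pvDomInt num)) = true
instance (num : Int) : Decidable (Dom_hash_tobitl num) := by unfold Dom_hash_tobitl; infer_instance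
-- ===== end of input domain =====

-- B renders the 32 masked bits with a fixed-width binary formatter and classifies its
-- characters, instead of A's per-position `num & 2**i` tests (objective: idiomatic).

-- ===== PORT A =====
def hash_tobitl (num : Int) : List String :=
  (PySem.List.pyRange 31 (-1) (-1)).foldl
    (fun r i =>
      if Int.land num (2 ^ i.toNat) = 2 ^ i.toNat then r ++ ["T"] else r ++ ["F"])
    []

-- ===== PORT B =====
-- port of format(m, '032b') for 0 ≤ m < 2^32 (exact there: B only calls it on the masked value):
-- fixed-width binary rendering, most significant bit first
def pvBinChars : Nat → Nat → List Char
  | _, 0 => []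
  | m, w + 1 => pvBinChars (m / 2) w ++ [if m % 2 = 1 then '1' else '0']

def hash_tobitl_alt (num : Int) : List String :=
  (pvBinChars (Int.land num 4294967295).toNat 32).map (fun c => if c = '1' then "T" else "F")

-- ===== PRECONDITION & SPEC =====
def Spec_hash_tobitl (num : Int) (out : List String) : Prop := out = hash_tobitl_alt num
instance (num : Int) (out : List String) : Decidable (Spec_hash_tobitl num out) := by unfold Spec_hash_tobitl; infer_instance

-- ===== CLAIM (what is proved, stated in full; the proofs are below) =====
def Claim_equal_hash_tobitl : Prop := ∀ (num : Int), Dom_hash_tobitl num → Spec_hash_tobitl num (hash_tobitl num)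

-- ===== LEMMAS AND PROOFS =====

theorem pv_foldl_emit (p : Nat → Prop) [DecidablePred p] :
    ∀ (l : List Nat) (acc : List String),
      l.foldl (fun r i => if p i then r ++ ["T"] else r ++ ["F"]) acc
        = acc ++ l.map (fun i => if p i then "T" else "F") := by
  intro l
  induction l with
  | nil => intro acc; simp
  | cons x xs ih =>
    intro acc
    by_cases h : p x <;> simp [List.foldl, h, ih, List.append_assoc]

theorem pv_pyRange_lit :
    PySem.List.pyRange 31 (-1) (-1) = (List.range 32).reverse.map (fun i : Nat => (i : Int)) := by
  decide

theorem pv_A_shape (num : Int) :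
    hash_tobitl num
      = (List.range 32).reverse.map
          (fun i : Nat => if Int.land num (2 ^ i) = (2 ^ i : Int) then "T" else "F") := by
  unfold hash_tobitl
  rw [pv_pyRange_lit, List.foldl_map,
      pv_foldl_emit (fun i : Nat => Int.land num (2 ^ ((i : Int)).toNat) = 2 ^ ((i : Int)).toNat)]
  simp

theorem pv_bin_shape : ∀ (w m : Nat),
    pvBinChars m w = (List.range w).reverse.map (fun i => if m.testBit i then '1' else '0') := by
  intro w
  induction w with
  | zero => intro m; simp [pvBinChars]
  | succ w ih =>
    intro m
    rw [pvBinChars, ih (m / 2)]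
    simp [List.range_succ_eq_map, List.map_map, Function.comp_def,
          Nat.testBit_add_one, Nat.testBit_zero]

theorem pv_B_shape (num : Int) :
    hash_tobitl_alt num
      = (List.range 32).reverse.map
          (fun i : Nat => if (Int.land num 4294967295).toNat.testBit i then "T" else "F") := by
  unfold hash_tobitl_alt
  rw [pv_bin_shape, List.map_map]
  refine List.map_congr_left ?_
  intro i _
  by_cases h : (Int.land num 4294967295).toNat.testBit i <;> simp [h]

theorem pv_two_pow_int (i : Nat) : ((2 : Int) ^ i) = Int.ofNat (2 ^ i) := by
  rfl

theorem pv_nat_and_two_pow_eq (n i : Nat) : (n &&& 2 ^ i = 2 ^ i) ↔ n.testBit i = true := by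
  rw [Nat.and_two_pow]
  cases h : n.testBit i <;> simp
  have := Nat.two_pow_pos i
  omega

theorem pv_ldiff_two_pow_eq (n i : Nat) :
    (Nat.ldiff (2 ^ i) n = 2 ^ i) ↔ n.testBit i = false := by
  constructor
  · intro h
    have := congrArg (fun x => Nat.testBit x i) h
    simp only [Nat.testBit_ldiff, Nat.testBit_two_pow] at this
    simpa using this
  · intro h
    apply Nat.eq_of_testBit_eq
    intro j
    rw [Nat.testBit_ldiff, Nat.testBit_two_pow]
    by_cases hj : i = j
    · subst hj; simp [h]
    · simp [hj]

theorem pv_key (num : Int) (i : Nat) (hi : i < 32) :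
    (Int.land num (2 ^ i) = (2 ^ i : Int))
      ↔ (Int.land num 4294967295).toNat.testBit i = true := by
  have hmask : (4294967295 : Int) = Int.ofNat (2 ^ 32 - 1) := by norm_num
  cases num with
  | ofNat n =>
    rw [pv_two_pow_int, hmask]
    show (Int.ofNat (n &&& 2 ^ i) = Int.ofNat (2 ^ i)) ↔ _
    have hm : Int.land (Int.ofNat n) (Int.ofNat (2 ^ 32 - 1)) = Int.ofNat (n &&& (2 ^ 32 - 1)) := rfl
    rw [hm, show (Int.ofNat (n &&& (2 ^ 32 - 1))).toNat = n &&& (2 ^ 32 - 1) from rfl]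
    rw [Nat.and_two_pow_sub_one_eq_mod, Nat.testBit_mod_two_pow]
    simp only [hi, decide_true, Bool.true_and]
    simp only [Int.ofNat.injEq]
    exact pv_nat_and_two_pow_eq n i
  | negSucc n =>
    rw [pv_two_pow_int, hmask]
    show (Int.ofNat (Nat.ldiff (2 ^ i) n) = Int.ofNat (2 ^ i)) ↔ _
    have hm : Int.land (Int.negSucc n) (Int.ofNat (2 ^ 32 - 1))
        = Int.ofNat (Nat.ldiff (2 ^ 32 - 1) n) := rfl
    rw [hm, show (Int.ofNat (Nat.ldiff (2 ^ 32 - 1) n)).toNat = Nat.ldiff (2 ^ 32 - 1) n from rfl]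
    simp only [Int.ofNat.injEq]
    rw [pv_ldiff_two_pow_eq]
    rw [Nat.testBit_ldiff, Nat.testBit_two_pow_sub_one]
    simp [hi]

-- ===== VERDICT (by name: the statement is the Claim_ definition above) =====
theorem hash_tobitl_spec : Claim_equal_hash_tobitl := by
  intro num _
  unfold Spec_hash_tobitl
  rw [pv_A_shape, pv_B_shape]
  refine List.map_congr_left ?_
  intro i hmem
  have hi : i < 32 := List.mem_range.mp (List.mem_reverse.mp hmem)
  by_cases h : Int.land num (2 ^ i) = (2 ^ i : Int)
  · rw [if_pos h, if_pos ((pv_key num i hi).mp h)]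
  · rw [if_neg h, if_neg (by simpa using (mt (pv_key num i hi).mpr h))]
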